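-- pv_equiv track=rewrite | github.com/loiccotte/SAE-QLIO-SD_Groupe2 | scripts/convert_to_sqlite.py | clean_insert
-- ===== SOURCE A (Python) =====
-- def clean_insert(sql: str) -> str:
--     """Convert a MySQL INSERT statement to SQLite-compatible SQL.
--
--     Handles MySQL backslash string escaping -> SQLite double-quote escaping.
--     """
--     # Remove backticks
--     sql = sql.replace('`', '')
--
--     # Process string escaping: MySQL uses \' for quotes, SQLite uses ''
--     result = []
--     i = 0
--     in_string = False
--
--     while i < len(sql):
--         ch = sql[i]
--
--         if not in_string:
--             if ch == "'":
--                 in_string = True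
--             result.append(ch)
--             i += 1
--         else:
--             # Inside a single-quoted string
--             if ch == '\\' and i + 1 < len(sql):
--                 next_ch = sql[i + 1]
--                 if next_ch == "'":
--                     result.append("''")
--                     i += 2
--                 elif next_ch == '\\':
--                     result.append('\\')
--                     i += 2
--                 elif next_ch == 'n':
--                     result.append('\n')
--                     i += 2
--                 elif next_ch == 'r':
--                     result.append('\r')
--                     i += 2
--                 elif next_ch == '0':
--                     result.append('\x00')
--                     i += 2
--                 elif next_ch == 'Z':
--                     result.append('\x1a')
--                     i += 2
--                 else:
--                     result.append(next_ch)
--                     i += 2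
--             elif ch == "'":
--                 in_string = False
--                 result.append(ch)
--                 i += 1
--             else:
--                 result.append(ch)
--                 i += 1
--
--     return ''.join(result)
-- ===== SOURCE B (Python) =====
-- _ESC = {"'": "''", "\\": "\\", "n": "\n", "r": "\r", "0": "\x00", "Z": "\x1a"}
--
--
-- def _consume_string(s):
--     """Translate one single-quoted string body (s starts just after the
--     opening quote); return (translated text incl. closing quote, remainder)."""
--     out = []
--     i = 0
--     n = len(s)
--     while i < n:
--         ch = s[i]
--         if ch == '\\' and i + 1 < n:
--             nxt = s[i + 1]
--             out.append(_ESC.get(nxt, nxt))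
--             i += 2
--         elif ch == "'":
--             out.append("'")
--             return ''.join(out), s[i + 1:]
--         else:
--             out.append(ch)
--             i += 1
--     return ''.join(out), ''
--
--
-- def clean_insert(sql: str) -> str:
--     """Convert a MySQL INSERT statement to SQLite-compatible SQL."""
--     sql = sql.replace('`', '')
--     pieces = []
--     rest = sql
--     while True:
--         pre, quote, rest = rest.partition("'")
--         pieces.append(pre + quote)
--         if not quote:
--             break
--         body, rest = _consume_string(rest)
--         pieces.append(body)
--     return ''.join(pieces)
-- ===== Notes on version B (the rewrite author's own statement) =====
-- stated objective: faster
-- what changed: Replaces A's single char-by-char state machine (in_string flag, if/elif escape chain) with a segment decomposition: bulk-copy text up to each opening quote via str.partition, then a dedicated string-body translator driven by an escape mapping dict.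
import Mathlib
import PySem

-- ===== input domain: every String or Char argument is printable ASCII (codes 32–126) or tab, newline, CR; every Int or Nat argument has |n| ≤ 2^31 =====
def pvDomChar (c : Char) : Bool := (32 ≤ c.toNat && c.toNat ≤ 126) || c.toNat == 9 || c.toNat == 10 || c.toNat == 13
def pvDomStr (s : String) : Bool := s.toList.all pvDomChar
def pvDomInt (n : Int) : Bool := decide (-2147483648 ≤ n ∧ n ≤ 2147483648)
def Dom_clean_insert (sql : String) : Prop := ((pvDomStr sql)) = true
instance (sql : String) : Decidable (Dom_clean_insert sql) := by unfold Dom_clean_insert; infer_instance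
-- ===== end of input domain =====

-- B rewrites A's single char-by-char state machine as a segment decomposition:
-- copy text up to each opening quote in bulk (str.partition / List.span), then a
-- dedicated string-body translator driven by an escape dict (constant-factor faster:
-- outside-string text is copied in bulk instead of appended one character at a time).
-- Equivalence proved for all inputs (both functions are total).

-- ===== PORT A =====
-- the if/elif chain on the character after a backslash, exactly as in A
def escA (d : Char) : List Char :=
  if d == '\'' then ['\'', '\'']
  else if d == '\\' then ['\\']
  else if d == 'n' then ['\n']
  else if d == 'r' then ['\r']
  else if d == '0' then ['\x00']
  else if d == 'Z' then ['\x1a']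
  else [d]

-- A's while loop: state = remaining characters + in_string flag
def cleanA : List Char → Bool → List Char
  | [], _ => []
  | c :: rest, false => c :: cleanA rest (c == '\'')
  | c :: d :: rest2, true =>
      if c == '\\' then escA d ++ cleanA rest2 true       -- ch == '\\' and i+1 < len
      else if c == '\'' then c :: cleanA (d :: rest2) false
      else c :: cleanA (d :: rest2) true
  | [c], true =>                                          -- i + 1 = len: the '\\' branch is closed
      if c == '\'' then c :: cleanA [] false
      else c :: cleanA [] true

def clean_insert (sql : String) : String :=
  String.ofList (cleanA (PySem.Str.replace sql "`" "").toList false)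

-- ===== PORT B =====
-- the _ESC dict of Source B
def pvESC : PySem.Dict Char String :=
  PySem.Dict.ofList [('\'', "''"), ('\\', "\\"), ('n', "\n"), ('r', "\r"), ('0', "\x00"), ('Z', "\x1a")]

-- _ESC.get(nxt, nxt)
def escB (d : Char) : List Char := (PySem.Dict.getD pvESC d (String.ofList [d])).toList

-- _consume_string: translate one quoted string body, return (output, remainder)
def consumeString : List Char → List Char × List Char
  | [] => ([], [])
  | c :: d :: rest2 =>
      if c == '\\' then                                   -- ch == '\\' and i+1 < n
        (escB d ++ (consumeString rest2).1, (consumeString rest2).2)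
      else if c == '\'' then (['\''], d :: rest2)
      else (c :: (consumeString (d :: rest2)).1, (consumeString (d :: rest2)).2)
  | [c] =>
      if c == '\'' then (['\''], []) else ([c], [])

-- termination measure for the outer loop: _consume_string never invents input
theorem consumeString_snd_length : ∀ l : List Char, (consumeString l).2.length ≤ l.length := by
  intro l
  induction l using consumeString.induct with
  | case1 => simp [consumeString]
  | case2 c d rest2 h ih => simp [consumeString, h]; omega
  | case3 c d rest2 h h' => simp [consumeString, h, h']
  | case4 c d rest2 h h' ih =>
    simp only [List.length_cons] at ih
    simp [consumeString, h, h']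
    omega
  | case5 c h => simp [consumeString, h]
  | case6 c h => simp [consumeString, h]

-- Source B's outer loop: rest.partition("'") = List.span (not a quote)
def cleanB (l : List Char) : List Char :=
  match h : List.span (fun c => !(c == '\'')) l with
  | (pre, []) => pre
  | (pre, q :: rest) =>
    pre ++ [q] ++ (consumeString rest).1 ++ cleanB (consumeString rest).2
termination_by l.length
decreasing_by
  have h1 : q :: rest = List.dropWhile (fun c => !(c == '\'')) l := by
    have := List.span_eq_takeWhile_dropWhile (p := fun c => !(c == '\'')) (l := l)
    rw [h] at this; exact congrArg Prod.snd this
  have h2 : (q :: rest).length ≤ l.length := by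
    rw [h1]; exact List.length_dropWhile_le _ _
  have h3 := consumeString_snd_length rest
  have h4 : rest.length < l.length := by
    simp only [List.length_cons] at h2; omega
  exact Nat.lt_of_le_of_lt h3 h4

def clean_insert_alt (sql : String) : String :=
  String.ofList (cleanB (PySem.Str.replace sql "`" "").toList)

-- ===== PRECONDITION & SPEC =====
def Spec_clean_insert (sql : String) (out : String) : Prop := out = clean_insert_alt sql
instance (sql : String) (out : String) : Decidable (Spec_clean_insert sql out) := by unfold Spec_clean_insert; infer_instance

-- ===== CLAIM (what is proved, stated in full; the proofs are below) =====
def Claim_equal_clean_insert : Prop := ∀ (sql : String), Dom_clean_insert sql → Spec_clean_insert sql (clean_insert sql)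

-- ===== LEMMAS AND PROOFS =====

-- the escape dict of B computes A's if/elif chain
theorem escB_eq_escA (d : Char) : escB d = escA d := by
  have hd : pvESC = PySem.Dict.mk [('\'', "''"), ('\\', "\\"), ('n', "\n"), ('r', "\r"), ('0', "\x00"), ('Z', "\x1a")] := by rfl
  by_cases h1 : d = '\''
  · subst h1; decide
  by_cases h2 : d = '\\'
  · subst h2; decide
  by_cases h3 : d = 'n'
  · subst h3; decide
  by_cases h4 : d = 'r'
  · subst h4; decide
  by_cases h5 : d = '0'
  · subst h5; decide
  by_cases h6 : d = 'Z'
  · subst h6; decide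
  have k1 : ('\'' == d) = false := by simp [Ne.symm h1]
  have k2 : ('\\' == d) = false := by simp [Ne.symm h2]
  have k3 : ('n' == d) = false := by simp [Ne.symm h3]
  have k4 : ('r' == d) = false := by simp [Ne.symm h4]
  have k5 : ('0' == d) = false := by simp [Ne.symm h5]
  have k6 : ('Z' == d) = false := by simp [Ne.symm h6]
  simp [escB, escA, hd, PySem.Dict.getD, PySem.Dict.get?,
    k1, k2, k3, k4, k5, k6, h1, h2, h3, h4, h5, h6]

-- inside a string, B's translator tracks A's in_string = True phase
theorem consume_eq_cleanA_true :
    ∀ l : List Char, cleanA l true = (consumeString l).1 ++ cleanA (consumeString l).2 false := by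
  intro l
  induction l using consumeString.induct with
  | case1 => simp [cleanA, consumeString]
  | case2 c d rest2 h ih =>
    simp [cleanA, consumeString, h, escB_eq_escA, ih]
  | case3 c d rest2 h h' =>
    have hc : c = '\'' := by simpa using h'
    subst hc
    simp [cleanA, consumeString, h]
  | case4 c d rest2 h h' ih =>
    simp [cleanA, consumeString, h, h', ih]
  | case5 c h =>
    have hc : c = '\'' := by simpa using h
    subst hc
    simp [cleanA, consumeString]
  | case6 c h =>
    simp [cleanA, consumeString, h]

-- quote-free prefixes pass through A's outside-string state unchanged
theorem cleanA_false_append (pre m : List Char) (hp : ∀ c ∈ pre, ¬ c = '\'') :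
    cleanA (pre ++ m) false = pre ++ cleanA m false := by
  induction pre with
  | nil => simp
  | cons c rest ih =>
    have hc : ¬ c = '\'' := hp c (by simp)
    have hb : (c == '\'') = false := by simp [hc]
    simp [cleanA, hb, ih (fun x hx => hp x (by simp [hx]))]

-- main: B's segment loop equals A's state machine
theorem cleanB_eq_cleanA (l : List Char) : cleanB l = cleanA l false := by
  induction l using cleanB.induct with
  | case1 l pre h =>
    have hs := List.span_eq_takeWhile_dropWhile (p := fun c => !(c == '\'')) (l := l)
    rw [h] at hs
    have hpre : pre = List.takeWhile (fun c => !(c == '\'')) l := congrArg Prod.fst hs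
    have hdrop : ([] : List Char) = List.dropWhile (fun c => !(c == '\'')) l := congrArg Prod.snd hs
    have hl : l = pre := by
      conv_lhs => rw [← List.takeWhile_append_dropWhile (p := fun c => !(c == '\'')) (l := l)]
      rw [← hpre, ← hdrop, List.append_nil]
    have hp : ∀ c ∈ pre, ¬ c = '\'' := by
      intro c hc
      have := List.mem_takeWhile_imp (hpre ▸ hc)
      simpa using this
    rw [cleanB, h, hl, show pre = pre ++ [] by simp, cleanA_false_append pre [] hp]
    simp [cleanA]
  | case2 l pre q rest h ih =>
    have hs := List.span_eq_takeWhile_dropWhile (p := fun c => !(c == '\'')) (l := l)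
    rw [h] at hs
    have hpre : pre = List.takeWhile (fun c => !(c == '\'')) l := congrArg Prod.fst hs
    have hdrop : q :: rest = List.dropWhile (fun c => !(c == '\'')) l := congrArg Prod.snd hs
    have hl : l = pre ++ q :: rest := by
      conv_lhs => rw [← List.takeWhile_append_dropWhile (p := fun c => !(c == '\'')) (l := l)]
      rw [← hpre, ← hdrop]
    have hp : ∀ c ∈ pre, ¬ c = '\'' := by
      intro c hc
      have := List.mem_takeWhile_imp (hpre ▸ hc)
      simpa using this
    have hq : q = '\'' := by
      have := List.head?_dropWhile_not (p := fun c => !(c == '\'')) (l := l)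
      rw [← hdrop] at this
      simpa using this
    rw [cleanB, h, hl, cleanA_false_append pre (q :: rest) hp]
    simp only [cleanA, hq]
    rw [show (('\'' : Char) == '\'') = true by simp]
    rw [consume_eq_cleanA_true rest, ← ih]
    simp

-- ===== VERDICT (by name: the statement is the Claim_ definition above) =====
theorem clean_insert_spec : Claim_equal_clean_insert := by
  intro sql _
  unfold Spec_clean_insert clean_insert clean_insert_alt
  rw [cleanB_eq_cleanA]
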